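-- pv_equiv track=rewrite | github.com/JaeHyeon-KAIST/coding-3 | experiments/rc_tempo/abstract_graph.py | _tree_knapsack
-- ===== SOURCE A (Python) =====
-- def _tree_knapsack(children_of, root, food_set):
--     """Post-order DP on pocket tree rooted at `root`.
--
--     Returns cost_list where cost_list[k] = min moves to collect exactly k food
--     in the subtree rooted at `root`, starting and ending at root.
--     cost_list[k] = None if k food is infeasible.
--     cost_list[0] = 0 (don't visit any food).
--
--     Edge weight = 1 move per parent-child step (pocket cells are grid-adjacent).
--     Round-trip to visit a child subtree = 2 moves for the single edge.
--     If a node is in food_set, visiting the node collects its food. "Being at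
--     the node" requires stepping onto it, so if v is food, the minimum food
--     count when landing at v is 1 (cost[v][0] = None).
--
--     Root itself is a special case: if root is food, cost[root][0] = None
--     (can't be at root without food). But the CALLER typically treats the
--     root (attach X) as already "entered free" from outside — so when
--     integrating, use cost[root] as-is and optionally add 1 food if root is
--     food. This function doesn't second-guess that; it reports the raw DP.
--     """
--     def dfs(v):
--         v_food = 1 if v in food_set else 0
--         if v_food:
--             my_cost = [None, 0]
--         else:
--             my_cost = [0]
--         for child in children_of.get(v, []):
--             child_cost = dfs(child)
--             new_len = len(my_cost) + len(child_cost) - 1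
--             new_cost = [None] * new_len
--             for k1 in range(len(my_cost)):
--                 if my_cost[k1] is None:
--                     continue
--                 # Option A: don't visit child (keep k1 food, pay 0 extra)
--                 if new_cost[k1] is None or new_cost[k1] > my_cost[k1]:
--                     new_cost[k1] = my_cost[k1]
--                 # Option B: visit child with k2 food (pay 2 edge + child_cost[k2])
--                 for k2 in range(len(child_cost)):
--                     if child_cost[k2] is None:
--                         continue
--                     total = k1 + k2
--                     if total >= new_len:
--                         continue
--                     c = my_cost[k1] + 2 + child_cost[k2]
--                     if new_cost[total] is None or new_cost[total] > c:
--                         new_cost[total] = c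
--             my_cost = new_cost
--         return my_cost
--
--     return dfs(root)
-- ===== SOURCE B (Python) =====
-- def _merge(my_cost, child_cost):
--     new_len = len(my_cost) + len(child_cost) - 1
--     new_cost = [None] * new_len
--     for k1 in range(len(my_cost)):
--         if my_cost[k1] is None:
--             continue
--         if new_cost[k1] is None or new_cost[k1] > my_cost[k1]:
--             new_cost[k1] = my_cost[k1]
--         for k2 in range(len(child_cost)):
--             if child_cost[k2] is None:
--                 continue
--             total = k1 + k2
--             if total >= new_len:
--                 continue
--             c = my_cost[k1] + 2 + child_cost[k2]
--             if new_cost[total] is None or new_cost[total] > c: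
--                 new_cost[total] = c
--     return new_cost
--
--
-- def _tree_knapsack(children_of, root, food_set):
--     # Phase 1: compute a post-order of the unfolded subtree with an explicit
--     # two-phase stack (no recursion, so no recursion-depth limit).
--     order = []
--     stack = [(root, False)]
--     while stack:
--         v, finished = stack.pop()
--         if finished:
--             order.append(v)
--         else:
--             stack.append((v, True))
--             for child in children_of.get(v, []):
--                 stack.append((child, False))
--     # Phase 2: fold the cost lists bottom-up along the post-order.
--     cost = {}
--     for v in order:
--         cur = [None, 0] if v in food_set else [0]
--         for child in children_of.get(v, []):
--             cur = _merge(cur, cost[child])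
--         cost[v] = cur
--     return cost[root]
-- ===== Notes on version B (the rewrite author's own statement) =====
-- stated objective: alternative
-- what changed: The recursive dfs is replaced by an iterative two-phase explicit-stack traversal that first produces a post-order list of the unfolded subtree and then folds the cost lists bottom-up through a dict keyed by node (same bounded-size merge, same child order), so B uses no recursion at all.
import Mathlib
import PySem

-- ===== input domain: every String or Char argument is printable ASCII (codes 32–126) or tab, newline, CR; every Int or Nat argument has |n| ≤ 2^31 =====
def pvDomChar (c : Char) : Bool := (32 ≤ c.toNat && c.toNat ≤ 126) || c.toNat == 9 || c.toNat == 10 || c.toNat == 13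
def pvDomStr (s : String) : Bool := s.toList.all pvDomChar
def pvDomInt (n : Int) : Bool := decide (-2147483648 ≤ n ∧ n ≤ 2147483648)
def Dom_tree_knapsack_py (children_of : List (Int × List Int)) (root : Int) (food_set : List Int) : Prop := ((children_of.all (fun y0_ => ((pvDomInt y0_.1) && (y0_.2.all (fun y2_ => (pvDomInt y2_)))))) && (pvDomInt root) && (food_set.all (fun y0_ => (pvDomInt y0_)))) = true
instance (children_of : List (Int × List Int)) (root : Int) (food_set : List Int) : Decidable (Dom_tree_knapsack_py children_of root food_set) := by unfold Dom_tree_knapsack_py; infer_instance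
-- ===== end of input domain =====

-- B replaces A's recursive dfs by an iterative two-phase-stack post-order pass plus a
-- bottom-up fold along that order (same merge, no recursion); objective: alternative.

-- ===== PORT A =====
-- shared helper: children_of.get(v, []) (dict lookup with default)
def pvKids (children_of : List (Int × List Int)) (v : Int) : List Int :=
  ((PySem.Dict.mk children_of).get? v).getD []

-- shared helper: the initial cost list ([None, 0] if v is food else [0])
def pvBase (food_set : List Int) (v : Int) : List (Option Int) :=
  if food_set.contains v then [none, some 0] else [some 0]

-- shared helper: the bounded-size merge of a node's cost list with one child's cost list
-- (identical double loop in Source A (inline) and Source B (_merge))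
def pvMerge (my cc : List (Option Int)) : List (Option Int) :=
  let newLen := my.length + cc.length - 1
  (List.range my.length).foldl (fun nc k1 =>
    match my.getD k1 none with
    | none => nc
    | some a =>
      let nc1 := match nc.getD k1 none with
        | none => nc.set k1 (some a)
        | some x => if x > a then nc.set k1 (some a) else nc
      (List.range cc.length).foldl (fun nc k2 =>
        match cc.getD k2 none with
        | none => nc
        | some b =>
          if k1 + k2 ≥ newLen then nc
          else
            let c := a + 2 + b
            match nc.getD (k1 + k2) none with
            | none => nc.set (k1 + k2) (some c)
            | some x => if x > c then nc.set (k1 + k2) (some c) else nc) nc1)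
    (List.replicate newLen (none : Option Int))

-- A's recursive dfs; fuel only makes the recursion structural (none = would not return,
-- excluded by Pre_); each step folds the children in order, merging each child's result
def pvDfs (children_of : List (Int × List Int)) (food_set : List Int) :
    Nat → Int → Option (List (Option Int))
  | 0, _ => none
  | f + 1, v =>
    (pvKids children_of v).foldl
      (fun acc c => acc.bind fun my => (pvDfs children_of food_set f c).map fun cc => pvMerge my cc)
      (some (pvBase food_set v))

def tree_knapsack_py (children_of : List (Int × List Int)) (root : Int) (food_set : List Int) : List (Option Int) :=
  (pvDfs children_of food_set (children_of.length + 1) root).getD []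

-- ===== PORT B =====
-- fuel bound for Source B's while loop: twice the unfolded subtree size (one loop iteration
-- per pushed frame); purely a totality device, computed from the input
def pvSize (children_of : List (Int × List Int)) : Nat → Int → Nat
  | 0, _ => 0
  | f + 1, v => (pvKids children_of v).foldl (fun a c => a + pvSize children_of f c) 1

-- phase 1 of Source B: the two-phase-stack while loop producing the post-order list
def pvLoop (children_of : List (Int × List Int)) :
    Nat → List (Int × Bool) → List Int → Option (List Int)
  | 0, _, _ => none
  | f + 1, stack, acc =>
    match stack with
    | [] => some acc
    | (v, fin) :: rest =>
      if fin then pvLoop children_of f rest (acc ++ [v])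
      else pvLoop children_of f
        ((pvKids children_of v).foldl (fun st c => (c, false) :: st) ((v, true) :: rest)) acc

-- phase 2 of Source B, body of `for v in order`: cost of v from the already-filled dict
-- (cost[child] is always present when v is reached; the [] default is never used)
def pvCostAt (children_of : List (Int × List Int)) (food_set : List Int)
    (d : PySem.Dict Int (List (Option Int))) (v : Int) : List (Option Int) :=
  (pvKids children_of v).foldl (fun cur c => pvMerge cur ((d.get? c).getD [])) (pvBase food_set v)

-- phase 2 of Source B: fold the cost dict along the post-order
def pvEvalF (children_of : List (Int × List Int)) (food_set : List Int)
    (d : PySem.Dict Int (List (Option Int))) (order : List Int) : PySem.Dict Int (List (Option Int)) :=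
  order.foldl (fun d v => d.insert v (pvCostAt children_of food_set d v)) d

def tree_knapsack_py_alt (children_of : List (Int × List Int)) (root : Int) (food_set : List Int) : List (Option Int) :=
  match pvLoop children_of (2 * pvSize children_of (children_of.length + 1) root + 1) [(root, false)] [] with
  | none => []
  | some order => ((pvEvalF children_of food_set PySem.Dict.empty order).get? root).getD []

-- ===== PRECONDITION & SPEC =====
-- bounded reachability in the children graph (fuel = max path length checked)
def pvReach (children_of : List (Int × List Int)) : Nat → Int → Int → Bool
  | 0, a, b => a == b
  | f + 1, a, b => a == b || (pvKids children_of a).any (fun c => pvReach children_of f c b)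

-- Pre_ excludes exactly the inputs whose children graph has a cycle reachable from root:
-- there A's recursion never returns (Python raises RecursionError) and B's loop never ends.
def Pre_tree_knapsack_py (children_of : List (Int × List Int)) (root : Int) (food_set : List Int) : Prop :=
  ∀ p ∈ children_of, pvReach children_of (children_of.length + 1) root p.1 = true →
    ∀ c ∈ p.2, pvReach children_of (children_of.length + 1) c p.1 = false

instance (children_of : List (Int × List Int)) (root : Int) (food_set : List Int) : Decidable (Pre_tree_knapsack_py children_of root food_set) := by
  unfold Pre_tree_knapsack_py; infer_instance

def pvWitness_tree_knapsack_py : (List (Int × List Int)) × Int × List Int :=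
  ([(0, [1, 2]), (1, []), (2, [])], 0, [1])

def Spec_tree_knapsack_py (children_of : List (Int × List Int)) (root : Int) (food_set : List Int) (out : List (Option Int)) : Prop := out = tree_knapsack_py_alt children_of root food_set
instance (children_of : List (Int × List Int)) (root : Int) (food_set : List Int) (out : List (Option Int)) : Decidable (Spec_tree_knapsack_py children_of root food_set out) := by unfold Spec_tree_knapsack_py; infer_instance

-- ===== CLAIM (what is proved, stated in full; the proofs are below) =====
def Claim_equal_tree_knapsack_py : Prop := ∀ (children_of : List (Int × List Int)) (root : Int) (food_set : List Int), Dom_tree_knapsack_py children_of root food_set → Pre_tree_knapsack_py children_of root food_set → Spec_tree_knapsack_py children_of root food_set (tree_knapsack_py children_of root food_set)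

-- ===== LEMMAS AND PROOFS =====

-- proof-side mirror of phase 1: the post-order of the unfolded subtree, children blocks
-- in stack-pop (reversed) order
def pvPo (children_of : List (Int × List Int)) : Nat → Int → Option (List Int)
  | 0, _ => none
  | f + 1, v =>
    ((pvKids children_of v).reverse.foldl
      (fun acc c => acc.bind fun l => (pvPo children_of f c).map fun lc => l ++ lc) (some [])).map
      (· ++ [v])

-- chains in the children graph (pvChainTo a l b: a walk a → … → b with step list l)
def pvChainTo (children_of : List (Int × List Int)) : Int → List Int → Int → Prop
  | a, [], b => a = b
  | a, c :: cs, b => c ∈ pvKids children_of a ∧ pvChainTo children_of c cs b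

lemma pvOptFold_none {α β γ : Type} (g : α → Option β) (m : γ → β → γ) (ks : List α) :
    ks.foldl (fun a c => a.bind fun x => (g c).map (m x)) none = none := by
  induction ks with
  | nil => rfl
  | cons c ks ih => simpa using ih

lemma pvOptFold_eq_some_iff {α β γ : Type} (g : α → Option β) (m : γ → β → γ) :
    ∀ (ks : List α) (acc r : γ),
      ks.foldl (fun a c => a.bind fun x => (g c).map (m x)) (some acc) = some r ↔
        ∃ rs, List.Forall₂ (fun c rc => g c = some rc) ks rs ∧ r = rs.foldl m acc := by
  intro ks
  induction ks with
  | nil =>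
    intro acc r
    constructor
    · intro h
      exact ⟨[], List.Forall₂.nil, by simpa using (Option.some.inj h).symm⟩
    · rintro ⟨rs, hrs, hr⟩
      cases hrs
      simp [hr]
  | cons c ks ih =>
    intro acc r
    cases hc : g c with
    | none =>
      simp only [List.foldl_cons, hc, Option.map_none, Option.bind_some]
      rw [pvOptFold_none g m ks]
      constructor
      · intro h; cases h
      · rintro ⟨rs, hrs, hr⟩
        cases hrs with
        | cons hg _ => rw [hc] at hg; cases hg
    | some b =>
      simp only [List.foldl_cons, hc, Option.map_some, Option.bind_some]
      rw [ih (m acc b) r]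
      constructor
      · rintro ⟨rs, hrs, hr⟩
        exact ⟨b :: rs, List.Forall₂.cons hc hrs, by simpa using hr⟩
      · rintro ⟨rs, hrs, hr⟩
        cases hrs with
        | cons hg hrest =>
          rw [hc] at hg
          cases hg
          exact ⟨_, hrest, by simpa using hr⟩

lemma pvForall₂_of_mem {α β : Type} (g : α → Option β) :
    ∀ (l : List α), (∀ c ∈ l, ∃ y, g c = some y) →
      ∃ ys, List.Forall₂ (fun c y => g c = some y) l ys := by
  intro l
  induction l with
  | nil => intro _; exact ⟨[], List.Forall₂.nil⟩
  | cons c cs ih =>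
    intro h
    obtain ⟨y, hy⟩ := h c (List.mem_cons_self ..)
    obtain ⟨ys, hys⟩ := ih (fun c' hc' => h c' (List.mem_cons_of_mem _ hc'))
    exact ⟨y :: ys, List.Forall₂.cons hy hys⟩

lemma pvForall₂_mem_left {α β : Type} {R : α → β → Prop} :
    ∀ {l₁ : List α} {l₂ : List β}, List.Forall₂ R l₁ l₂ → ∀ c ∈ l₁, ∃ y, R c y := by
  intro l₁ l₂ h
  induction h with
  | nil => intro c hc; cases hc
  | cons hr _ ih =>
    intro c hc
    rcases List.mem_cons.mp hc with rfl | hc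
    · exact ⟨_, hr⟩
    · exact ih c hc

lemma pvFoldlAppend {α : Type} :
    ∀ (pos : List (List α)) (acc : List α), pos.foldl (fun a b => a ++ b) acc = acc ++ pos.flatten := by
  intro pos
  induction pos with
  | nil => intro acc; simp
  | cons p ps ih => intro acc; simp [ih]

lemma pvDfs_succ_iff (cof : List (Int × List Int)) (fs : List Int) (f : Nat) (v : Int)
    (r : List (Option Int)) :
    pvDfs cof fs (f + 1) v = some r ↔
      ∃ rs, List.Forall₂ (fun c rc => pvDfs cof fs f c = some rc) (pvKids cof v) rs ∧
        r = rs.foldl pvMerge (pvBase fs v) := by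
  show (pvKids cof v).foldl
      (fun acc c => acc.bind fun my => (pvDfs cof fs f c).map fun cc => pvMerge my cc)
      (some (pvBase fs v)) = some r ↔ _
  exact pvOptFold_eq_some_iff (pvDfs cof fs f) pvMerge (pvKids cof v) (pvBase fs v) r

lemma pvPo_succ_iff (cof : List (Int × List Int)) (f : Nat) (v : Int) (po : List Int) :
    pvPo cof (f + 1) v = some po ↔
      ∃ pos, List.Forall₂ (fun c pc => pvPo cof f c = some pc) (pvKids cof v).reverse pos ∧
        po = pos.flatten ++ [v] := by
  show (((pvKids cof v).reverse.foldl
      (fun acc c => acc.bind fun l => (pvPo cof f c).map fun lc => l ++ lc) (some [])).map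
      (· ++ [v])) = some po ↔ _
  rw [Option.map_eq_some_iff]
  constructor
  · rintro ⟨L, hL, rfl⟩
    obtain ⟨pos, hpos, rfl⟩ :=
      (pvOptFold_eq_some_iff (pvPo cof f) (fun a b => a ++ b) (pvKids cof v).reverse [] L).mp hL
    exact ⟨pos, hpos, by rw [pvFoldlAppend]; simp⟩
  · rintro ⟨pos, hpos, rfl⟩
    refine ⟨pos.flatten, ?_, rfl⟩
    exact (pvOptFold_eq_some_iff (pvPo cof f) (fun a b => a ++ b) (pvKids cof v).reverse [] _).mpr
      ⟨pos, hpos, by rw [pvFoldlAppend]; simp⟩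

lemma pvDfs_mono (cof : List (Int × List Int)) (fs : List Int) :
    ∀ (f g : Nat) (v : Int) (r : List (Option Int)), f ≤ g →
      pvDfs cof fs f v = some r → pvDfs cof fs g v = some r := by
  intro f
  induction f with
  | zero => intro g v r _ h; cases h
  | succ f ih =>
    intro g v r hle h
    obtain ⟨g', rfl⟩ : ∃ g', g = g' + 1 := ⟨g - 1, by omega⟩
    rw [pvDfs_succ_iff] at h ⊢
    obtain ⟨rs, hrs, hr⟩ := h
    exact ⟨rs, hrs.imp (fun {c rc} hc => ih g' c rc (by omega) hc), hr⟩

lemma pvDfs_unique (cof : List (Int × List Int)) (fs : List Int) {f g : Nat} {v : Int}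
    {r r' : List (Option Int)} (h : pvDfs cof fs f v = some r)
    (h' : pvDfs cof fs g v = some r') : r = r' := by
  have h1 := pvDfs_mono cof fs f (max f g) v r (le_max_left ..) h
  have h2 := pvDfs_mono cof fs g (max f g) v r' (le_max_right ..) h'
  rw [h1] at h2
  exact Option.some.inj h2

lemma pvPo_isSome (cof : List (Int × List Int)) (fs : List Int) :
    ∀ (f : Nat) (v : Int) (r : List (Option Int)), pvDfs cof fs f v = some r →
      ∃ po, pvPo cof f v = some po := by
  intro f
  induction f with
  | zero => intro v r h; cases h
  | succ f ih =>
    intro v r h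
    rw [pvDfs_succ_iff] at h
    obtain ⟨rs, hrs, _⟩ := h
    have hmem : ∀ c ∈ (pvKids cof v).reverse, ∃ pc, pvPo cof f c = some pc := by
      intro c hc
      obtain ⟨rc, hrc⟩ := pvForall₂_mem_left hrs c (List.mem_reverse.mp hc)
      exact ih c rc hrc
    obtain ⟨pos, hpos⟩ := pvForall₂_of_mem (pvPo cof f) _ hmem
    exact ⟨pos.flatten ++ [v], (pvPo_succ_iff cof f v _).mpr ⟨pos, hpos, rfl⟩⟩

lemma pvPush (cof : List (Int × List Int)) :
    ∀ (kids : List Int) (T : List (Int × Bool)),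
      kids.foldl (fun st c => (c, false) :: st) T =
        kids.reverse.map (fun c => (c, false)) ++ T := by
  intro kids
  induction kids with
  | nil => intro T; simp
  | cons c cs ih => intro T; simp [ih]

lemma pvFoldlAdd (s : Int → Nat) :
    ∀ (l : List Int) (n : Nat), l.foldl (fun a c => a + s c) n = n + (l.map s).sum := by
  intro l
  induction l with
  | nil => intro n; simp
  | cons c cs ih => intro n; simp [ih]; omega

lemma pvSize_succ (cof : List (Int × List Int)) (f : Nat) (v : Int) :
    pvSize cof (f + 1) v = 1 + ((pvKids cof v).map (pvSize cof f)).sum := by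
  show (pvKids cof v).foldl (fun a c => a + pvSize cof f c) 1 = _
  exact pvFoldlAdd (pvSize cof f) (pvKids cof v) 1

lemma pvLoop_sim_kids (cof : List (Int × List Int)) (f : Nat)
    (ih : ∀ (v : Int) (po : List Int), pvPo cof f v = some po →
      ∀ (k : Nat) (S : List (Int × Bool)) (acc : List Int),
        pvLoop cof (2 * pvSize cof f v + k) ((v, false) :: S) acc = pvLoop cof k S (acc ++ po)) :
    ∀ (rkids : List Int) (pos : List (List Int)),
      List.Forall₂ (fun c pc => pvPo cof f c = some pc) rkids pos →
      ∀ (k : Nat) (S : List (Int × Bool)) (acc : List Int),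
        pvLoop cof (2 * (rkids.map (pvSize cof f)).sum + k)
          (rkids.map (fun c => (c, false)) ++ S) acc = pvLoop cof k S (acc ++ pos.flatten) := by
  intro rkids pos h
  induction h with
  | nil => intro k S acc; simp
  | @cons c pc cs pcs hpc _ ihr =>
    intro k S acc
    have harith : 2 * ((c :: cs).map (pvSize cof f)).sum + k =
        2 * pvSize cof f c + (2 * (cs.map (pvSize cof f)).sum + k) := by
      simp [List.map_cons]; ring
    rw [harith]
    show pvLoop cof _ ((c, false) :: (cs.map (fun c => (c, false)) ++ S)) acc = _
    rw [ih c pc hpc _ _ acc, ihr]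
    simp

-- phase-1 simulation: processing one (v, False) frame consumes exactly 2·size fuel and
-- appends v's post-order block
lemma pvLoop_sim (cof : List (Int × List Int)) :
    ∀ (f : Nat) (v : Int) (po : List Int), pvPo cof f v = some po →
      ∀ (k : Nat) (S : List (Int × Bool)) (acc : List Int),
        pvLoop cof (2 * pvSize cof f v + k) ((v, false) :: S) acc = pvLoop cof k S (acc ++ po) := by
  intro f
  induction f with
  | zero => intro v po h; cases h
  | succ f ih =>
    intro v po h k S acc
    rw [pvPo_succ_iff] at h
    obtain ⟨pos, hpos, rfl⟩ := h
    have harith : 2 * pvSize cof (f + 1) v + k =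
        (2 * (((pvKids cof v).reverse.map (pvSize cof f)).sum) + (k + 1)) + 1 := by
      rw [pvSize_succ, List.map_reverse, List.sum_reverse]
      ring
    rw [harith]
    show pvLoop cof (_ + 1) ((v, false) :: S) acc = _
    rw [show ∀ n, pvLoop cof (n + 1) ((v, false) :: S) acc =
        pvLoop cof n ((pvKids cof v).foldl (fun st c => (c, false) :: st) ((v, true) :: S)) acc
      from fun n => rfl]
    rw [pvPush cof (pvKids cof v) ((v, true) :: S)]
    rw [pvLoop_sim_kids cof f ih (pvKids cof v).reverse pos hpos (k + 1) ((v, true) :: S) acc]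
    show pvLoop cof (k + 1) ((v, true) :: S) (acc ++ pos.flatten) = _
    rw [show pvLoop cof (k + 1) ((v, true) :: S) (acc ++ pos.flatten) =
        pvLoop cof k S ((acc ++ pos.flatten) ++ [v]) from rfl]
    simp

def pvDVal (cof : List (Int × List Int)) (fs : List Int)
    (d : PySem.Dict Int (List (Option Int))) : Prop :=
  ∀ u x, d.get? u = some x → ∃ g, pvDfs cof fs g u = some x

lemma pvEvalF_append (cof : List (Int × List Int)) (fs : List Int)
    (d : PySem.Dict Int (List (Option Int))) (l₁ l₂ : List Int) :
    pvEvalF cof fs d (l₁ ++ l₂) = pvEvalF cof fs (pvEvalF cof fs d l₁) l₂ := by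
  simp [pvEvalF]

lemma pvEval_sim_kids (cof : List (Int × List Int)) (fs : List Int) (f : Nat)
    (ih : ∀ (v : Int) (po : List Int) (r : List (Option Int))
      (d : PySem.Dict Int (List (Option Int))),
      pvPo cof f v = some po → pvDfs cof fs f v = some r → pvDVal cof fs d →
        pvDVal cof fs (pvEvalF cof fs d po) ∧
        (∀ u x, d.get? u = some x → (pvEvalF cof fs d po).get? u = some x) ∧
        (pvEvalF cof fs d po).get? v = some r) :
    ∀ (rkids : List Int) (pos : List (List Int)),
      List.Forall₂ (fun c pc => pvPo cof f c = some pc) rkids pos →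
      (∀ c ∈ rkids, ∃ rc, pvDfs cof fs f c = some rc) →
      ∀ (d : PySem.Dict Int (List (Option Int))), pvDVal cof fs d →
        pvDVal cof fs (pvEvalF cof fs d pos.flatten) ∧
        (∀ u x, d.get? u = some x → (pvEvalF cof fs d pos.flatten).get? u = some x) ∧
        (∀ c ∈ rkids, ∀ rc, pvDfs cof fs f c = some rc →
          (pvEvalF cof fs d pos.flatten).get? c = some rc) := by
  intro rkids pos h
  induction h with
  | nil =>
    intro _ d hd
    exact ⟨hd, fun u x hx => hx, fun c hc => absurd hc (List.not_mem_nil)⟩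
  | @cons c pc cs pcs hpc _ ihr =>
    intro hmem d hd
    obtain ⟨rc, hrc⟩ := hmem c (List.mem_cons_self ..)
    have h1 := ih c pc rc d hpc hrc hd
    have h2 := ihr (fun c' hc' => hmem c' (List.mem_cons_of_mem _ hc')) (pvEvalF cof fs d pc) h1.1
    rw [show (pc :: pcs).flatten = pc ++ pcs.flatten from rfl, pvEvalF_append]
    refine ⟨h2.1, fun u x hx => h2.2.1 u x (h1.2.1 u x hx), ?_⟩
    intro c' hc' rc' hrc'
    rcases List.mem_cons.mp hc' with rfl | hc'
    · rw [hrc] at hrc'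
      cases hrc'
      exact h2.2.1 c' rc h1.2.2
    · exact h2.2.2 c' hc' rc' hrc'

lemma pvCost_fold (cof : List (Int × List Int)) (fs : List Int) (f : Nat)
    (d1 : PySem.Dict Int (List (Option Int))) :
    ∀ (kids : List Int) (rs : List (List (Option Int))),
      List.Forall₂ (fun c rc => pvDfs cof fs f c = some rc) kids rs →
      (∀ c ∈ kids, ∀ rc, pvDfs cof fs f c = some rc → d1.get? c = some rc) →
      ∀ (cur : List (Option Int)),
        kids.foldl (fun cur c => pvMerge cur ((d1.get? c).getD [])) cur = rs.foldl pvMerge cur := by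
  intro kids rs h
  induction h with
  | nil => intro _ cur; rfl
  | @cons c rc cs rcs hrc _ ihr =>
    intro hpres cur
    have hc : d1.get? c = some rc := hpres c (List.mem_cons_self ..) rc hrc
    simp only [List.foldl_cons, hc, Option.getD_some]
    exact ihr (fun c' hc' => hpres c' (List.mem_cons_of_mem _ hc')) (pvMerge cur rc)

-- phase-2 simulation: folding v's post-order block leaves correct entries and puts
-- dfs(v)'s value at v
lemma pvEval_sim (cof : List (Int × List Int)) (fs : List Int) :
    ∀ (f : Nat) (v : Int) (po : List Int) (r : List (Option Int))
      (d : PySem.Dict Int (List (Option Int))),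
      pvPo cof f v = some po → pvDfs cof fs f v = some r → pvDVal cof fs d →
        pvDVal cof fs (pvEvalF cof fs d po) ∧
        (∀ u x, d.get? u = some x → (pvEvalF cof fs d po).get? u = some x) ∧
        (pvEvalF cof fs d po).get? v = some r := by
  intro f
  induction f with
  | zero => intro v po r d hpo; cases hpo
  | succ f ih =>
    intro v po r d hpo hdfs hd
    have hdfs' := hdfs
    rw [pvPo_succ_iff] at hpo
    obtain ⟨pos, hpos, rfl⟩ := hpo
    rw [pvDfs_succ_iff] at hdfs
    obtain ⟨rs, hrs, rfl⟩ := hdfs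
    have hmem : ∀ c ∈ (pvKids cof v).reverse, ∃ rc, pvDfs cof fs f c = some rc := by
      intro c hc
      exact pvForall₂_mem_left hrs c (List.mem_reverse.mp hc)
    have hk := pvEval_sim_kids cof fs f ih (pvKids cof v).reverse pos hpos hmem d hd
    have hstep : pvEvalF cof fs d (pos.flatten ++ [v]) =
        (pvEvalF cof fs d pos.flatten).insert v
          (pvCostAt cof fs (pvEvalF cof fs d pos.flatten) v) := by
      rw [pvEvalF_append]; rfl
    have hcost : pvCostAt cof fs (pvEvalF cof fs d pos.flatten) v =
        rs.foldl pvMerge (pvBase fs v) := by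
      exact pvCost_fold cof fs f _ (pvKids cof v) rs hrs
        (fun c hc rc h => hk.2.2 c (List.mem_reverse.mpr hc) rc h) (pvBase fs v)
    rw [hstep, hcost]
    refine ⟨?_, ?_, PySem.Dict.get?_insert_self ..⟩
    · intro u x hx
      by_cases hu : u = v
      · subst hu
        rw [PySem.Dict.get?_insert_self] at hx
        cases hx
        exact ⟨f + 1, hdfs'⟩
      · rw [PySem.Dict.get?_insert_of_ne _ _ hu] at hx
        exact hk.1 u x hx
    · intro u x hx
      have hx1 := hk.2.1 u x hx
      by_cases hu : u = v
      · subst hu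
        obtain ⟨g, hg⟩ := hk.1 u x hx1
        have : x = rs.foldl pvMerge (pvBase fs u) := pvDfs_unique cof fs hg hdfs'
        rw [PySem.Dict.get?_insert_self, this]
      · rw [PySem.Dict.get?_insert_of_ne _ _ hu]
        exact hx1

lemma pvChainTo_reach (cof : List (Int × List Int)) :
    ∀ (l : List Int) (a b : Int) (f : Nat), pvChainTo cof a l b → l.length ≤ f →
      pvReach cof f a b = true := by
  intro l
  induction l with
  | nil =>
    intro a b f h _
    cases h
    cases f <;> simp [pvReach]
  | cons c cs ih =>
    intro a b f h hlen
    obtain ⟨f', rfl⟩ : ∃ f', f = f' + 1 := ⟨f - 1, by simp at hlen; omega⟩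
    obtain ⟨hc, hrest⟩ := h
    show (a == b || (pvKids cof a).any fun c => pvReach cof f' c b) = true
    refine Bool.or_eq_true_iff.mpr (Or.inr ?_)
    exact List.any_eq_true.mpr ⟨c, hc, ih c b f' hrest (by simp at hlen; omega)⟩

lemma pvChainTo_suffix (cof : List (Int × List Int)) :
    ∀ (l : List Int) (a b c : Int), pvChainTo cof a l b → c ∈ l →
      ∃ l', pvChainTo cof c l' b ∧ l'.length < l.length := by
  intro l
  induction l with
  | nil => intro a b c _ hc; cases hc
  | cons x xs ih =>
    intro a b c h hc
    obtain ⟨hx, hrest⟩ := h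
    rcases List.mem_cons.mp hc with rfl | hc
    · exact ⟨xs, hrest, by simp⟩
    · obtain ⟨l', hl', hlt⟩ := ih x b c hrest hc
      exact ⟨l', hl', by simp; omega⟩

lemma pvChainTo_append (cof : List (Int × List Int)) :
    ∀ (l : List Int) (a b c : Int), pvChainTo cof a l b → c ∈ pvKids cof b →
      pvChainTo cof a (l ++ [c]) c := by
  intro l
  induction l with
  | nil =>
    intro a b c h hc
    cases h
    exact ⟨hc, rfl⟩
  | cons x xs ih =>
    intro a b c h hc
    obtain ⟨hx, hrest⟩ := h
    exact ⟨hx, ih x b c hrest hc⟩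

lemma pvKids_mem_keys (cof : List (Int × List Int)) (v : Int) (h : pvKids cof v ≠ []) :
    (v, pvKids cof v) ∈ cof := by
  unfold pvKids at h ⊢
  cases hg : (PySem.Dict.mk cof).get? v with
  | none => rw [hg] at h; simp at h
  | some cs =>
    have := PySem.Dict.mem_items_of_get?_eq_some _ hg
    simpa using this

lemma pvChainTo_length_le (cof : List (Int × List Int)) (root : Int) :
    ∀ (l : List Int) (v : Int), pvChainTo cof root l v → (root :: l).Nodup →
      l.length ≤ cof.length := by
  intro l v hchain hnodup
  have hkeys : ∀ x ∈ (root :: l).dropLast, pvKids cof x ≠ [] := by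
    clear hnodup
    revert root hchain
    induction l with
    | nil => intro a _ x hx; simp at hx
    | cons c cs ih =>
      intro a h x hx
      obtain ⟨hc, hrest⟩ := h
      rw [show (a :: c :: cs).dropLast = a :: (c :: cs).dropLast from rfl] at hx
      rcases List.mem_cons.mp hx with rfl | hx
      · exact List.ne_nil_of_mem hc
      · exact ih c hrest x hx
  have hsub : (root :: l).dropLast ⊆ cof.map Prod.fst := by
    intro x hx
    have := pvKids_mem_keys cof x (hkeys x hx)
    exact List.mem_map.mpr ⟨(x, pvKids cof x), this, rfl⟩
  have hnd : ((root :: l).dropLast).Nodup := hnodup.sublist (List.dropLast_sublist _)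
  have := (List.subperm_of_subset hnd hsub).length_le
  simpa using this

lemma pvDfs_total (cof : List (Int × List Int)) (root : Int) (fs : List Int)
    (hpre : Pre_tree_knapsack_py cof root fs) :
    ∀ (fuel : Nat) (v : Int) (l : List Int), pvChainTo cof root l v → (root :: l).Nodup →
      cof.length + 2 ≤ l.length + 1 + fuel → ∃ r, pvDfs cof fs fuel v = some r := by
  intro fuel
  induction fuel with
  | zero =>
    intro v l hchain hnodup hlen
    exfalso
    have := pvChainTo_length_le cof root l v hchain hnodup
    omega
  | succ f ih =>
    intro v l hchain hnodup hlen
    have hlle : l.length ≤ cof.length := pvChainTo_length_le cof root l v hchain hnodup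
    have hk : ∀ c ∈ pvKids cof v, ∃ rc, pvDfs cof fs f c = some rc := by
      intro c hc
      have hcnot : c ∉ root :: l := by
        intro hcin
        have hvkey : (v, pvKids cof v) ∈ cof := pvKids_mem_keys cof v (List.ne_nil_of_mem hc)
        have h1 : pvReach cof (cof.length + 1) root v = true :=
          pvChainTo_reach cof l root v _ hchain (by omega)
        have h2 : pvReach cof (cof.length + 1) c v = true := by
          rcases List.mem_cons.mp hcin with rfl | hcl
          · exact pvChainTo_reach cof l c v _ hchain (by omega)
          · obtain ⟨l', hl', hlt⟩ := pvChainTo_suffix cof l root v c hchain hcl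
            exact pvChainTo_reach cof l' c v _ hl' (by omega)
        have := hpre (v, pvKids cof v) hvkey h1 c hc
        rw [h2] at this
        cases this
      refine ih c (l ++ [c]) (pvChainTo_append cof l root v c hchain hc) ?_ ?_
      · rw [show root :: (l ++ [c]) = (root :: l) ++ [c] from rfl]
        rw [← List.concat_eq_append]
        exact List.Nodup.concat hcnot hnodup
      · simp
        omega
    obtain ⟨rs, hrs⟩ := pvForall₂_of_mem (pvDfs cof fs f) (pvKids cof v) hk
    exact ⟨_, (pvDfs_succ_iff cof fs f v _).mpr ⟨rs, hrs, rfl⟩⟩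

-- ===== VERDICT (by name: the statement is the Claim_ definition above) =====
theorem tree_knapsack_py_spec : Claim_equal_tree_knapsack_py := by
  intro cof root fs _hdom hpre
  unfold Spec_tree_knapsack_py
  obtain ⟨r, hr⟩ := pvDfs_total cof root fs hpre (cof.length + 1) root [] rfl (by simp)
    (by simp; omega)
  obtain ⟨po, hpo⟩ := pvPo_isSome cof fs (cof.length + 1) root r hr
  have hA : tree_knapsack_py cof root fs = r := by
    unfold tree_knapsack_py
    rw [hr]
    rfl
  have hloop : pvLoop cof (2 * pvSize cof (cof.length + 1) root + 1) [(root, false)] [] =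
      some po := by
    have := pvLoop_sim cof (cof.length + 1) root po hpo 1 [] []
    rw [this]
    simp
    rfl
  have heval := pvEval_sim cof fs (cof.length + 1) root po r PySem.Dict.empty hpo hr
    (by intro u x h; rw [PySem.Dict.get?_empty] at h; cases h)
  unfold tree_knapsack_py_alt
  rw [hloop, hA]
  show r = ((pvEvalF cof fs PySem.Dict.empty po).get? root).getD []
  rw [heval.2.2]
  rfl
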